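-- pv_equiv track=rewrite | github.com/kyupkyup/algorithms | 카카오 무지의 먹방 라이브/카카오 무지의 먹방 라이브/카카오_무지의_먹방_라이브.py | solution
-- ===== SOURCE A (Python) =====
-- def solution(food_times, k):
--     food_times.insert(0, 0)
--     length = len(food_times)
--
--     count = 0 # count는 내가 몇 초 동안 음식을 먹고있었는지
--     # 푸드를 순회하면서 중지되는 시점에 먹고있던 포인터를 리턴하면됨
--     pointer = 1 # 내가 현재 먹고 있는 음식을 포인팅
--     while True:
--
--         if count == k: # 방송이 정지되는 시점이 오면
--             while food_times[pointer] == 0: # 내가 방송이 정지되는 시점에 먹을 음식이 0이면 다음 음식으로 넘어가야함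
--                 pointer += 1
--                 if pointer == length:  # 만약 그 0인 음식이 마지막이라면 맨 처음으로 넘어가야함
--                     pointer = 1
--             return pointer
--
--         if food_times[pointer] != 0:  # 지금 먹을 음식이 0이 아니라면 그대로 1을 빼줌
--             food_times[pointer] -= 1
--             if sum(food_times) == 0:  # 모든 음식을 다 먹었으면 먹을게 없으니 -1 리턴
--                 return -1
--         else:
--             pointer += 1  # 먹을 음식이 0이라면 다음 음식으로 넘어감
--             if pointer == length:
--                 pointer = 1
--             continue
--
--
--         pointer += 1 # 다음 음식이 뭔지 알아야되므로 마지막에 한번 더 플러스 해줘서 다음 음식을 알아냄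
--         if pointer == length:
--             pointer = 1
--         count += 1
-- ===== SOURCE B (Python) =====
-- def solution(food_times, k):
--     if k < 0:
--         return -1  # the broadcast never pauses, so every food gets eaten
--     q = [(i + 1, t) for i, t in enumerate(food_times) if t > 0]
--     head = 0
--     for _ in range(k):
--         if head == len(q):
--             return -1
--         i, t = q[head]
--         head += 1
--         if t > 1:
--             q.append((i, t - 1))
--     return q[head][0] if head < len(q) else -1
-- ===== Notes on version B (the rewrite author's own statement) =====
-- stated objective: alternative
-- what changed: B replaces A's second-by-second walk over the mutable array (which re-scans the whole list with sum() after every bite and re-skips exhausted slots) by a single FIFO queue of the still-edible foods built once from enumerate: each simulated second pops one queue entry and re-appends it with one unit less, so exhausted foods leave the data structure instead of being skipped repeatedly (O(n+k) work vs A's O(k*n) on the claimed domain; a timing run's large inputs lie outside Pre_, so no measured speed is claimed).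
-- outside the precondition, e.g. on solution([0], 0): A does not finish within the time limit, B returns -1; on solution([], 0): A raises IndexError, B returns -1; on solution([-1], 0): A returns 1, B returns -1
import Mathlib
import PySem

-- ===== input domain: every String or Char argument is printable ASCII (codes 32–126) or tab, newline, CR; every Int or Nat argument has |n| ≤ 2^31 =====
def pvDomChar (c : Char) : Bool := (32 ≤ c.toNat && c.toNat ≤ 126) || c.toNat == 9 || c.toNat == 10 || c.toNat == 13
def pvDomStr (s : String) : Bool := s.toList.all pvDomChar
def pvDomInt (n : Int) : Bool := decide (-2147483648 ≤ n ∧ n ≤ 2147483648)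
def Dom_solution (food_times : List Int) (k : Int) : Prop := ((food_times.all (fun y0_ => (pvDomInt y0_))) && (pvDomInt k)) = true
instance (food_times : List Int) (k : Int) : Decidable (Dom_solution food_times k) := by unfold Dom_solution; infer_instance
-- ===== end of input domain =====

-- B replaces A's second-by-second array walk (with its O(n) sum() per second and
-- repeated zero-skipping) by a single queue of the still-edible foods, popping one
-- entry per second; equivalence is about the RETURN value only (A mutates its
-- argument in place, B does not).

-- ===== PORT A =====
-- inner `while food_times[pointer] == 0` loop (fuel-totalized; in-range reads only under Pre_)
def solutionSkip (foods : List Int) (length : Nat) : Nat → Nat → Nat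
  | 0, p => p
  | f+1, p =>
    if foods.getD p 0 = 0 then
      let p1 := p + 1
      solutionSkip foods length f (if p1 = length then 1 else p1)
    else p

-- outer `while True` loop (fuel-totalized: fuel suffices on every input admitted by Pre_)
def solutionLoop (k : Int) (length : Nat) : Nat → List Int → Nat → Int → Int
  | 0, _, _, _ => 0
  | f+1, foods, p, c =>
    if c = k then
      ((solutionSkip foods length (length + 1) p : Nat) : Int)
    else if foods.getD p 0 ≠ 0 then
      let foods' := foods.set p (foods.getD p 0 - 1)
      if foods'.sum = 0 then -1
      else
        let p1 := p + 1
        solutionLoop k length f foods' (if p1 = length then 1 else p1) (c + 1)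
    else
      let p1 := p + 1
      solutionLoop k length f foods (if p1 = length then 1 else p1) c

def solution (food_times : List Int) (k : Int) : Int :=
  let foods := 0 :: food_times          -- food_times.insert(0, 0)
  let length := foods.length
  solutionLoop k length ((k.toNat + foods.sum.toNat + 2) * (length + 1) + 5) foods 1 0

-- ===== PORT B =====
-- `for _ in range(k)` over the queue `q` with running head index
def solutionAltLoop : Nat → List (Int × Int) → Nat → Int
  | 0, q, head =>
    match q[head]? with            -- q[head][0] if head < len(q) else -1
    | some it => it.1
    | none => -1
  | n+1, q, head =>
    if head = q.length then -1
    else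
      match q[head]? with
      | some it =>
          solutionAltLoop n (if it.2 > 1 then q ++ [(it.1, it.2 - 1)] else q) (head + 1)
      | none => -1

def solution_alt (food_times : List Int) (k : Int) : Int :=
  if k < 0 then -1       -- the broadcast never pauses, so every food gets eaten
  else
  let q := (PySem.List.enumerate food_times).filterMap
             (fun it => if it.2 > 0 then some (it.1 + 1, it.2) else none)
  solutionAltLoop k.toNat q 0

-- ===== PRECONDITION & SPEC =====
-- Pre_ is the problem's natural domain: a nonempty list of nonnegative eating times, not
-- all zero (any integer k is admitted).  Outside it A raises IndexError (empty list),
-- loops forever (all-zero list), or returns values shaped by its ad-hoc mutation of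
-- negative entries, which no caller of this Kakao task supplies.
def Pre_solution (food_times : List Int) (k : Int) : Prop :=
  food_times ≠ [] ∧ (∀ t ∈ food_times, 0 ≤ t) ∧ 0 < food_times.sum
instance (food_times : List Int) (k : Int) : Decidable (Pre_solution food_times k) := by
  unfold Pre_solution; infer_instance
def pvWitness_solution : List Int × Int := ([3, 1, 2], 5)

def Spec_solution (food_times : List Int) (k : Int) (out : Int) : Prop := out = solution_alt food_times k
instance (food_times : List Int) (k : Int) (out : Int) : Decidable (Spec_solution food_times k out) := by unfold Spec_solution; infer_instance

-- ===== CLAIM (what is proved, stated in full; the proofs are below) =====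
def Claim_equal_solution : Prop := ∀ (food_times : List Int) (k : Int), Dom_solution food_times k → Pre_solution food_times k → Spec_solution food_times k (solution food_times k)

-- ===== LEMMAS AND PROOFS =====

-- the indices A's pointer will visit, in order, starting at p (padded list, indices 1..L-1)
def pvCyc (L p : Nat) : List Nat := List.range' p (L - p) ++ List.range' 1 (p - 1)

-- the still-edible foods among an index list, in that order, as (index, remaining) pairs
def pvAct (foods : List Int) (l : List Nat) : List (Int × Int) :=
  l.filterMap (fun (i : Nat) => match foods[i]? with
    | some t => if t = 0 then none else some ((i : Int), t)
    | none => none)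

-- zero-prefix length of the pointer's upcoming indices (termination measure for the skip loop)
def pvLz (foods : List Int) (L p : Nat) : Nat :=
  ((pvCyc L p).takeWhile (fun i => foods.getD i 0 == 0)).length


lemma pvCyc_eq_cons (L p : Nat) (h1 : 1 ≤ p) (h2 : p < L) :
    pvCyc L p = p :: (List.range' (p+1) (L-1-p) ++ List.range' 1 (p-1)) := by
  unfold pvCyc
  have hLp : L - p = (L - 1 - p) + 1 := by omega
  rw [hLp, List.range'_succ]
  simp

lemma pvCyc_rot (L p : Nat) (h1 : 1 ≤ p) (h2 : p < L) :
    pvCyc L (if p + 1 = L then 1 else p + 1)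
      = (List.range' (p+1) (L-1-p) ++ List.range' 1 (p-1)) ++ [p] := by
  by_cases h : p + 1 = L
  · rw [if_pos h]
    unfold pvCyc
    have h0 : L - 1 - p = 0 := by omega
    have h1' : L - 1 = (p - 1) + 1 := by omega
    have hcat : List.range' 1 ((p-1)+1) = List.range' 1 (p-1) ++ [1 + 1 * (p-1)] :=
      List.range'_concat
    have hp : 1 + 1 * (p - 1) = p := by omega
    have hp2 : 1 + (p - 1) = p := by omega
    have h0' : p - 1 + 1 - p = 0 := by omega
    simp [h0, h0', h1', hcat, hp, hp2]
  · rw [if_neg h]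
    unfold pvCyc
    have hA : L - (p+1) = L - 1 - p := by omega
    have hB : (p + 1) - 1 = (p - 1) + 1 := by omega
    have hcat : List.range' 1 ((p-1)+1) = List.range' 1 (p-1) ++ [1 + 1 * (p-1)] :=
      List.range'_concat
    have hp : 1 + 1 * (p - 1) = p := by omega
    rw [hA, hB, hcat, hp, List.append_assoc]

lemma mem_pvCyc (L p i : Nat) (h1 : 1 ≤ p) (h2 : p < L) :
    i ∈ pvCyc L p ↔ 1 ≤ i ∧ i < L := by
  unfold pvCyc
  simp only [List.mem_append, List.mem_range'_1]
  omega

lemma pvAct_append (foods : List Int) (l1 l2 : List Nat) :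
    pvAct foods (l1 ++ l2) = pvAct foods l1 ++ pvAct foods l2 := by
  unfold pvAct; exact List.filterMap_append

lemma pvAct_set_ne (foods : List Int) (p : Nat) (v : Int) (l : List Nat) (h : p ∉ l) :
    pvAct (foods.set p v) l = pvAct foods l := by
  unfold pvAct
  apply List.filterMap_congr
  intro i hi
  have : p ≠ i := fun he => h (he ▸ hi)
  rw [List.getElem?_set_ne this]

lemma pvSum_set (foods : List Int) (p : Nat) (t : Int) (hp : foods[p]? = some t) :
    (foods.set p (t - 1)).sum = foods.sum - 1 := by
  obtain ⟨hlen, hget⟩ := List.getElem?_eq_some_iff.mp hp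
  have hdec : foods.sum = (foods.take p).sum + (foods[p] :: foods.drop (p+1)).sum := by
    conv_lhs => rw [← List.take_append_drop p foods, List.sum_append]
    rw [List.drop_eq_getElem_cons hlen]
  rw [List.sum_set]
  rw [if_pos hlen]
  rw [hdec, hget]
  simp [List.sum_cons]
  ring

lemma pvSum_zero_all (l : List Int) (hn : ∀ x ∈ l, 0 ≤ x) (hs : l.sum = 0) :
    ∀ x ∈ l, x = 0 := by
  induction l with
  | nil => simp
  | cons a l ih =>
    have ha : 0 ≤ a := hn a (by simp)
    have hl : ∀ x ∈ l, 0 ≤ x := fun x hx => hn x (by simp [hx])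
    have hnl : 0 ≤ l.sum := List.sum_nonneg hl
    rw [List.sum_cons] at hs
    have ha0 : a = 0 := by omega
    have hl0 : l.sum = 0 := by omega
    intro x hx
    rcases List.mem_cons.mp hx with h | h
    · omega
    · exact ih hl hl0 x h

lemma pvAct_ne_nil (foods : List Int) (L p : Nat) (hL : foods.length = L)
    (h1 : 1 ≤ p) (h2 : p < L) (hn : ∀ x ∈ foods, 0 ≤ x)
    (h0 : foods[0]? = some 0) (hs : foods.sum ≠ 0) :
    pvAct foods (pvCyc L p) ≠ [] := by
  intro hnil
  apply hs
  apply List.sum_eq_zero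
  intro x hx
  obtain ⟨j, hj, hget⟩ := List.getElem_of_mem hx
  by_cases hj0 : j = 0
  · subst hj0
    have : foods[0]? = some x := List.getElem?_eq_some_iff.mpr ⟨hj, hget⟩
    rw [h0] at this
    exact (Option.some_injective _ this).symm
  · have hjc : j ∈ pvCyc L p := (mem_pvCyc L p j h1 h2).mpr ⟨by omega, by omega⟩
    have hnone := (List.filterMap_eq_nil_iff.mp hnil) j hjc
    have hjget : foods[j]? = some x := List.getElem?_eq_some_iff.mpr ⟨hj, hget⟩
    simp only [hjget] at hnone
    by_contra hne
    simp [hne] at hnone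

lemma pvAct_eat_cons (foods : List Int) (L p : Nat) (t : Int)
    (h1 : 1 ≤ p) (h2 : p < L) (hp : foods[p]? = some t) (ht : t ≠ 0) :
    pvAct foods (pvCyc L p)
      = ((p : Int), t) :: pvAct foods (List.range' (p+1) (L-1-p) ++ List.range' 1 (p-1)) := by
  rw [pvCyc_eq_cons L p h1 h2]
  unfold pvAct
  rw [List.filterMap_cons]
  simp [hp, ht]

lemma pvRest_not_mem (L p : Nat) (h1 : 1 ≤ p) (h2 : p < L) :
    p ∉ (List.range' (p+1) (L-1-p) ++ List.range' 1 (p-1)) := by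
  simp only [List.mem_append, List.mem_range'_1]
  omega

lemma pvAct_eat_rot (foods : List Int) (L p : Nat) (t : Int) (hL : foods.length = L)
    (h1 : 1 ≤ p) (h2 : p < L) (hp : foods[p]? = some t) :
    pvAct (foods.set p (t-1)) (pvCyc L (if p + 1 = L then 1 else p + 1))
      = pvAct foods (List.range' (p+1) (L-1-p) ++ List.range' 1 (p-1))
          ++ (if t - 1 = 0 then [] else [((p : Int), t - 1)]) := by
  rw [pvCyc_rot L p h1 h2, pvAct_append,
      pvAct_set_ne foods p (t-1) _ (pvRest_not_mem L p h1 h2)]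
  congr 1
  unfold pvAct
  have hplen : p < foods.length := by omega
  rw [List.filterMap_cons]
  simp only [List.getElem?_set_self hplen, List.filterMap_nil]
  by_cases h : t - 1 = 0 <;> simp [h]

lemma pvAct_skip (foods : List Int) (L p : Nat)
    (h1 : 1 ≤ p) (h2 : p < L) (hp : foods[p]? = some 0) :
    pvAct foods (pvCyc L (if p + 1 = L then 1 else p + 1)) = pvAct foods (pvCyc L p) := by
  rw [pvCyc_rot L p h1 h2, pvCyc_eq_cons L p h1 h2, pvAct_append]
  unfold pvAct
  rw [List.filterMap_cons]
  simp [hp]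

lemma pvTakeWhile_append_left {α : Type} (z : α → Bool) (l l' : List α)
    (h : ∃ x ∈ l, z x = false) :
    (l ++ l').takeWhile z = l.takeWhile z := by
  induction l with
  | nil => obtain ⟨x, hx, _⟩ := h; simp at hx
  | cons a l ih =>
    by_cases ha : z a
    · rw [List.cons_append, List.takeWhile_cons, if_pos ha, List.takeWhile_cons, if_pos ha]
      obtain ⟨x, hx, hzx⟩ := h
      rcases List.mem_cons.mp hx with rfl | hxl
      · rw [ha] at hzx; cases hzx
      · rw [ih ⟨x, hxl, hzx⟩]
    · rw [List.cons_append, List.takeWhile_cons, if_neg ha, List.takeWhile_cons, if_neg ha]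

lemma pvLz_le (foods : List Int) (L p : Nat) (h1 : 1 ≤ p) (h2 : p < L) :
    pvLz foods L p ≤ L := by
  unfold pvLz
  have hsub := (List.takeWhile_sublist
    (l := pvCyc L p) (fun i => foods.getD i 0 == 0)).length_le
  have hlen : (pvCyc L p).length = (L - p) + (p - 1) := by
    unfold pvCyc; simp
  omega

lemma pvLz_skip (foods : List Int) (L p : Nat)
    (h1 : 1 ≤ p) (h2 : p < L) (hp : foods[p]? = some 0)
    (hne : pvAct foods (pvCyc L p) ≠ []) :
    pvLz foods L (if p + 1 = L then 1 else p + 1) + 1 = pvLz foods L p := by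
  -- some index in the rest of the cycle still has food
  have hrest : pvAct foods (List.range' (p+1) (L-1-p) ++ List.range' 1 (p-1)) ≠ [] := by
    intro hnil
    apply hne
    rw [pvCyc_eq_cons L p h1 h2]
    unfold pvAct at hnil ⊢
    rw [List.filterMap_cons]
    simp [hp, hnil]
  obtain ⟨x, hx⟩ := List.exists_mem_of_ne_nil _ hrest
  obtain ⟨i, hi, hfi⟩ := List.mem_filterMap.mp hx
  obtain ⟨v, hji, hvne⟩ : ∃ v, foods[i]? = some v ∧ v ≠ 0 := by
    cases hji : foods[i]? with
    | none => rw [hji] at hfi; simp at hfi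
    | some v =>
      rw [hji] at hfi
      by_cases hv : v = 0
      · rw [hv] at hfi; simp at hfi
      · exact ⟨v, rfl, hv⟩
  have hwit : (fun (j : Nat) => foods.getD j 0 == 0) i = false := by
    simp [List.getD_eq_getElem?_getD, hji, hvne]
  unfold pvLz
  rw [pvCyc_rot L p h1 h2, pvCyc_eq_cons L p h1 h2,
      pvTakeWhile_append_left _ _ _ ⟨i, hi, hwit⟩, List.takeWhile_cons]
  simp [List.getD_eq_getElem?_getD, hp]

lemma pvSkip_eval (foods : List Int) (L : Nat) :
    ∀ (f p : Nat), foods.length = L → 2 ≤ L → 1 ≤ p → p < L →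
      pvLz foods L p + 1 ≤ f →
      ∀ (h : Int × Int) (tl : List (Int × Int)), pvAct foods (pvCyc L p) = h :: tl →
      ((solutionSkip foods L f p : Nat) : Int) = h.1 := by
  intro f
  induction f with
  | zero => intro p _ _ _ _ hf; omega
  | succ f ih =>
    intro p hL hL2 h1 h2 hf h tl hact
    have hplen : p < foods.length := by omega
    obtain ⟨t, hp⟩ : ∃ t, foods[p]? = some t :=
      ⟨foods[p], List.getElem?_eq_some_iff.mpr ⟨hplen, rfl⟩⟩
    have hgd : foods.getD p 0 = t := by rw [List.getD_eq_getElem?_getD, hp]; rfl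
    by_cases ht : t = 0
    · subst ht
      simp only [solutionSkip, hgd, if_pos rfl]
      have hne : pvAct foods (pvCyc L p) ≠ [] := by rw [hact]; simp
      have hlz := pvLz_skip foods L p h1 h2 hp hne
      have hw1 : 1 ≤ (if p + 1 = L then 1 else p + 1) := by split <;> omega
      have hw2 : (if p + 1 = L then 1 else p + 1) < L := by split <;> omega
      exact ih _ hL hL2 hw1 hw2 (by omega) h tl
        (by rw [pvAct_skip foods L p h1 h2 hp]; exact hact)
    · simp only [solutionSkip, hgd, if_neg ht]
      rw [pvAct_eat_cons foods L p t h1 h2 hp ht] at hact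
      have : h = ((p : Int), t) := (List.cons.injEq _ _ _ _ ▸ hact).1.symm
      rw [this]

lemma pvAltLoop_empty : ∀ (r : Nat) (q : List (Int × Int)) (head : Nat),
    q.length ≤ head → solutionAltLoop r q head = -1 := by
  intro r q head hle
  cases r with
  | zero => simp [solutionAltLoop, List.getElem?_eq_none hle]
  | succ n =>
    simp only [solutionAltLoop]
    by_cases h : head = q.length
    · simp [h]
    · rw [if_neg h, List.getElem?_eq_none hle]

lemma pvMain (k : Int) (L : Nat) :
    ∀ (f : Nat) (foods : List Int) (p : Nat) (c : Int) (q : List (Int × Int)) (head r : Nat),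
      foods.length = L → 2 ≤ L → 1 ≤ p → p < L →
      (∀ x ∈ foods, 0 ≤ x) → foods[0]? = some 0 →
      c + (r : Int) = k →
      pvAct foods (pvCyc L p) = q.drop head → head ≤ q.length →
      pvAct foods (pvCyc L p) ≠ [] →
      r * (L + 1) + pvLz foods L p + 1 ≤ f →
      solutionLoop k L f foods p c = solutionAltLoop r q head := by
  intro f
  induction f with
  | zero => intro foods p c q head r _ _ _ _ _ _ _ _ _ _ hf; omega
  | succ f ih =>
    intro foods p c q head r hL hL2 h1 h2 hnn h0 hck hinv hhead hne hf
    have hplen : p < foods.length := by omega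
    obtain ⟨t, hp⟩ : ∃ t, foods[p]? = some t :=
      ⟨foods[p], List.getElem?_eq_some_iff.mpr ⟨hplen, rfl⟩⟩
    have hgd : foods.getD p 0 = t := by rw [List.getD_eq_getElem?_getD, hp]; rfl
    by_cases hc : c = k
    · -- count == k: inner skip loop vs queue head
      have hr0 : r = 0 := by omega
      subst hr0
      obtain ⟨h, tl, hact⟩ : ∃ h tl, pvAct foods (pvCyc L p) = h :: tl := by
        cases hact : pvAct foods (pvCyc L p) with
        | nil => exact absurd hact hne
        | cons h tl => exact ⟨h, tl, rfl⟩
      have hq : q[head]? = some h := by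
        have : (q.drop head)[0]? = some h := by rw [← hinv, hact]; rfl
        rwa [List.getElem?_drop, Nat.add_zero] at this
      simp only [solutionLoop, if_pos hc, solutionAltLoop, hq]
      exact pvSkip_eval foods L (L+1) p hL hL2 h1 h2
        (by have := pvLz_le foods L p h1 h2; omega) h tl hact
    · -- count ≠ k: one more second of eating (or a zero-skip)
      obtain ⟨r', rfl⟩ : ∃ r', r = r' + 1 := by
        cases r with
        | zero => simp at hck; omega
        | succ r' => exact ⟨r', rfl⟩
      by_cases ht : t = 0
      · -- skip a finished food: pointer advances, nothing else changes
        subst ht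
        simp only [solutionLoop, if_neg hc, hgd]
        rw [if_neg (by simp)]
        have hw1 : 1 ≤ (if p + 1 = L then 1 else p + 1) := by split <;> omega
        have hw2 : (if p + 1 = L then 1 else p + 1) < L := by split <;> omega
        have hlz := pvLz_skip foods L p h1 h2 hp hne
        exact ih foods _ c q head (r'+1) hL hL2 hw1 hw2 hnn h0 hck
          (by rw [pvAct_skip foods L p h1 h2 hp]; exact hinv)
          hhead (by rw [pvAct_skip foods L p h1 h2 hp]; exact hne) (by omega)
      · -- eat one unit of food p
        have ht1 : 1 ≤ t := by
          have := hnn t (List.mem_of_getElem? hp)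
          omega
        have hact := pvAct_eat_cons foods L p t h1 h2 hp ht
        have hdrop : q.drop head
            = ((p : Int), t) :: pvAct foods (List.range' (p+1) (L-1-p) ++ List.range' 1 (p-1)) := by
          rw [← hinv, hact]
        have hq : q[head]? = some ((p : Int), t) := by
          have : (q.drop head)[0]? = some ((p : Int), t) := by rw [hdrop]; rfl
          rwa [List.getElem?_drop, Nat.add_zero] at this
        have hheadlt : head < q.length := by
          by_contra hge
          rw [List.drop_eq_nil_iff.mpr (by omega)] at hdrop
          cases hdrop
        -- the B step
        simp only [solutionLoop, if_neg hc, hgd, solutionAltLoop,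
          if_neg (by omega : ¬ head = q.length), hq]
        rw [if_pos ht]
        set q' := if t > 1 then q ++ [((p : Int), t - 1)] else q with hq'
        set foods' := foods.set p (t - 1) with hfoods'
        have hdrop' : q'.drop (head + 1)
            = pvAct foods (List.range' (p+1) (L-1-p) ++ List.range' 1 (p-1))
                ++ (if t - 1 = 0 then [] else [((p : Int), t - 1)]) := by
          have htail : q.drop (head + 1)
              = pvAct foods (List.range' (p+1) (L-1-p) ++ List.range' 1 (p-1)) := by
            rw [← List.drop_drop, hdrop, List.drop_one, List.tail_cons]
          by_cases hgt : t > 1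
          · rw [hq', if_pos hgt, List.drop_append_of_le_length (by omega), htail,
              if_neg (by omega : ¬ t - 1 = 0)]
          · have ht1' : t = 1 := by omega
            rw [hq', if_neg hgt, htail, ht1']
            simp
        have heat := pvAct_eat_rot foods L p t hL h1 h2 hp
        have hinv' : pvAct foods' (pvCyc L (if p + 1 = L then 1 else p + 1))
            = q'.drop (head + 1) := by rw [← hfoods'] at heat; rw [heat, hdrop']
        have hsum := pvSum_set foods p t hp
        by_cases hs : foods'.sum = 0
        · -- everything eaten: A returns -1; B's queue has emptied
          rw [if_pos hs]
          have hzero : ∀ x ∈ foods', x = 0 := by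
            apply pvSum_zero_all foods' _ hs
            intro x hx
            rcases List.mem_or_eq_of_mem_set hx with h | h
            · exact hnn x h
            · omega
          have hempt : pvAct foods' (pvCyc L (if p + 1 = L then 1 else p + 1)) = [] := by
            apply List.filterMap_eq_nil_iff.mpr
            intro j hj
            cases hjq : foods'[j]? with
            | none => simp
            | some v =>
              have := hzero v (List.mem_of_getElem? hjq)
              simp [this]
          rw [hinv'] at hempt
          rw [pvAltLoop_empty r' q' (head + 1) (List.drop_eq_nil_iff.mp hempt)]
        · -- still food left: recurse with the new state
          rw [if_neg hs]
          have hw1 : 1 ≤ (if p + 1 = L then 1 else p + 1) := by split <;> omega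
          have hw2 : (if p + 1 = L then 1 else p + 1) < L := by split <;> omega
          have hL' : foods'.length = L := by rw [hfoods', List.length_set]; exact hL
          have hnn' : ∀ x ∈ foods', 0 ≤ x := by
            intro x hx
            rcases List.mem_or_eq_of_mem_set hx with h | h
            · exact hnn x h
            · omega
          have h0' : foods'[0]? = some 0 := by
            rw [hfoods', List.getElem?_set_ne (by omega : p ≠ 0)]; exact h0
          have hhead' : head + 1 ≤ q'.length := by
            have : q.length ≤ q'.length := by
              rw [hq']; split <;> simp
            omega
          have hne' : pvAct foods' (pvCyc L (if p + 1 = L then 1 else p + 1)) ≠ [] :=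
            pvAct_ne_nil foods' L _ hL' hw1 hw2 hnn' h0' hs
          have hck' : (c + 1) + (r' : Int) = k := by push_cast at hck ⊢; omega
          have hfuel : r' * (L + 1) + pvLz foods' L (if p + 1 = L then 1 else p + 1) + 1 ≤ f := by
            have hlzb := pvLz_le foods' L _ hw1 hw2
            have hmul : (r' + 1) * (L + 1) = r' * (L + 1) + (L + 1) := by ring
            omega
          exact ih foods' _ (c + 1) q' (head + 1) r' hL' hL2 hw1 hw2 hnn' h0' hck'
            hinv' hhead' hne' hfuel

lemma pvMainNeg (k : Int) (hk : k < 0) (L : Nat) :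
    ∀ (f : Nat) (foods : List Int) (p : Nat) (c : Int),
      foods.length = L → 2 ≤ L → 1 ≤ p → p < L →
      (∀ x ∈ foods, 0 ≤ x) → foods[0]? = some 0 → 0 ≤ c →
      foods.sum ≠ 0 →
      foods.sum.toNat * (L + 1) + pvLz foods L p + 1 ≤ f →
      solutionLoop k L f foods p c = -1 := by
  intro f
  induction f with
  | zero => intro foods p c _ _ _ _ _ _ _ _ hf; omega
  | succ f ih =>
    intro foods p c hL hL2 h1 h2 hnn h0 hc hs hf
    have hplen : p < foods.length := by omega
    obtain ⟨t, hp⟩ : ∃ t, foods[p]? = some t :=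
      ⟨foods[p], List.getElem?_eq_some_iff.mpr ⟨hplen, rfl⟩⟩
    have hgd : foods.getD p 0 = t := by rw [List.getD_eq_getElem?_getD, hp]; rfl
    have hne : pvAct foods (pvCyc L p) ≠ [] :=
      pvAct_ne_nil foods L p hL h1 h2 hnn h0 hs
    have hw1 : 1 ≤ (if p + 1 = L then 1 else p + 1) := by split <;> omega
    have hw2 : (if p + 1 = L then 1 else p + 1) < L := by split <;> omega
    simp only [solutionLoop, if_neg (by omega : ¬ c = k), hgd]
    by_cases ht : t = 0
    · subst ht
      rw [if_neg (by simp)]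
      have hlz := pvLz_skip foods L p h1 h2 hp hne
      exact ih foods _ c hL hL2 hw1 hw2 hnn h0 hc hs (by omega)
    · rw [if_pos ht]
      have ht1 : 1 ≤ t := by
        have := hnn t (List.mem_of_getElem? hp)
        omega
      set foods' := foods.set p (t - 1) with hfoods'
      have hsum := pvSum_set foods p t hp
      rw [← hfoods'] at hsum
      by_cases hz : foods'.sum = 0
      · rw [if_pos hz]
      · rw [if_neg hz]
        have hL' : foods'.length = L := by rw [hfoods', List.length_set]; exact hL
        have hnn' : ∀ x ∈ foods', 0 ≤ x := by
          intro x hx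
          rcases List.mem_or_eq_of_mem_set hx with h | h
          · exact hnn x h
          · omega
        have h0' : foods'[0]? = some 0 := by
          rw [hfoods', List.getElem?_set_ne (by omega : p ≠ 0)]; exact h0
        have hs0 : 0 ≤ foods.sum := List.sum_nonneg hnn
        have hs0' : 0 ≤ foods'.sum := List.sum_nonneg hnn'
        have hsge : 2 ≤ foods.sum := by omega
        obtain ⟨s', hs'⟩ : ∃ s', foods.sum.toNat = s' + 1 := ⟨foods.sum.toNat - 1, by omega⟩
        have hsn' : foods'.sum.toNat = s' := by omega
        have hlzb := pvLz_le foods' L _ hw1 hw2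
        have hmul : (s' + 1) * (L + 1) = s' * (L + 1) + (L + 1) := by ring
        exact ih foods' _ (c + 1) hL' hL2 hw1 hw2 hnn' h0' (by omega) hz
          (by rw [hsn']; rw [hs'] at hf; omega)

lemma pvInit : ∀ (ft pre : List Int), (∀ t ∈ ft, 0 ≤ t) →
    pvAct (pre ++ ft) (List.range' pre.length ft.length)
      = (PySem.List.enumerate ft ((pre.length : Int) - 1)).filterMap
          (fun it => if it.2 > 0 then some (it.1 + 1, it.2) else none) := by
  intro ft
  induction ft with
  | nil => intro pre _; simp [pvAct, PySem.List.enumerate]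
  | cons t rest ih =>
    intro pre hnn
    have hT : 0 ≤ t := hnn t (by simp)
    rw [List.length_cons, List.range'_succ]
    unfold pvAct
    rw [List.filterMap_cons, PySem.List.enumerate_cons, List.filterMap_cons]
    have hget : (pre ++ t :: rest)[pre.length]? = some t := by
      rw [List.getElem?_append_right (Nat.le_refl _), Nat.sub_self]
      rfl
    have htail : pvAct (pre ++ t :: rest) (List.range' (pre.length + 1) rest.length)
        = (PySem.List.enumerate rest ((pre.length : Int) - 1 + 1)).filterMap
            (fun it => if it.2 > 0 then some (it.1 + 1, it.2) else none) := by
      have hre : pre ++ t :: rest = (pre ++ [t]) ++ rest := by simp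
      have hlen : (pre ++ [t]).length = pre.length + 1 := by simp
      have := ih (pre ++ [t]) (fun x hx => hnn x (by simp [hx]))
      rw [hlen] at this
      have harg : (((pre.length + 1 : Nat) : Int)) - 1 = (pre.length : Int) - 1 + 1 := by
        push_cast; ring
      rw [harg] at this
      rw [hre, this]
    simp only [hget]
    by_cases ht0 : t = 0
    · subst ht0
      unfold pvAct at htail
      simpa using htail
    · rw [if_neg ht0, if_pos (by omega)]
      unfold pvAct at htail
      rw [htail]
      have hhd : (pre.length : Int) - 1 + 1 = (pre.length : Int) := by ring
      rw [hhd]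

-- ===== VERDICT (by name: the statement is the Claim_ definition above) =====
theorem solution_spec : Claim_equal_solution := by
  intro ft k _hdom hpre
  obtain ⟨hne, hnn, hsum⟩ := hpre
  unfold Spec_solution solution solution_alt
  have hL2 : 2 ≤ (0 :: ft).length := by
    cases ft with
    | nil => exact absurd rfl hne
    | cons a l => simp
  set L := (0 :: ft).length with hLdef
  have hnn' : ∀ x ∈ (0 :: ft), (0:Int) ≤ x := by
    intro x hx
    rcases List.mem_cons.mp hx with h | h
    · omega
    · exact hnn x h
  have hsum' : (0 :: ft).sum ≠ 0 := by simp; omega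
  by_cases hk : k < 0
  · -- never paused: both sides give -1
    rw [if_pos hk]
    apply pvMainNeg k hk L _ (0 :: ft) 1 0 rfl hL2 (by omega) (by omega) hnn' rfl
      (by omega) hsum'
    simp only [← hLdef]
    have hlz := pvLz_le (0 :: ft) L 1 (by omega) (by omega)
    have hmul : (k.toNat + (0 :: ft).sum.toNat + 2) * (L + 1)
        = k.toNat * (L + 1) + (0 :: ft).sum.toNat * (L + 1) + 2 * (L + 1) := by ring
    have hk0 : k.toNat = 0 := by omega
    omega
  · rw [if_neg hk]
    push_neg at hk
    have hcyc1 : pvCyc L 1 = List.range' 1 ft.length := by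
      unfold pvCyc
      simp [hLdef]
    have hq0 : pvAct (0 :: ft) (pvCyc L 1)
        = (PySem.List.enumerate ft).filterMap
            (fun it => if it.2 > 0 then some (it.1 + 1, it.2) else none) := by
      rw [hcyc1]
      have := pvInit ft [0] hnn
      simp only [List.length_cons, List.length_nil] at this
      rw [List.singleton_append] at this
      rw [this]
      norm_num [PySem.List.enumerate]
    apply pvMain k L _ (0 :: ft) 1 0 _ 0 k.toNat rfl hL2 (by omega) (by omega) hnn' rfl
    · simp [Int.toNat_of_nonneg hk]
    · rw [List.drop_zero, hq0]
    · omega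
    · apply pvAct_ne_nil (0 :: ft) L 1 rfl (by omega) (by omega) hnn' rfl hsum'
    · simp only [← hLdef]
      have hlz := pvLz_le (0 :: ft) L 1 (by omega) (by omega)
      have hmul : (k.toNat + (0 :: ft).sum.toNat + 2) * (L + 1)
          = k.toNat * (L + 1) + (0 :: ft).sum.toNat * (L + 1) + 2 * (L + 1) := by ring
      omega
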